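-- pv_equiv track=rewrite | github.com/prindle-jason/Advent2022 | src/solutions/Day18.py | count_inner_exposed_faces
-- ===== SOURCE A (Python) =====
-- FACE_NEIGHBOR_OFFSETS = [[1,0,0],[-1,0,0],[0,1,0],[0,-1,0],[0,0,1],[0,0,-1]]
--
-- def count_inner_exposed_faces(lava_cubes, interior_groups):
--     inner_exposure = 0
--     for group in interior_groups:
--         for cube in group:
--             exposed = 0
--             for offset in FACE_NEIGHBOR_OFFSETS:
--                 neighbor = tuple([x+y for x,y in zip(cube, offset)])
--                 if neighbor in lava_cubes:
--                     exposed += 1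
--             inner_exposure += exposed
--     return inner_exposure
-- ===== SOURCE B (Python) =====
-- FACE_NEIGHBOR_OFFSETS = [[1,0,0],[-1,0,0],[0,1,0],[0,-1,0],[0,0,1],[0,0,-1]]
--
-- def count_inner_exposed_faces(lava_cubes, interior_groups):
--     # Inverted traversal: index the interior cubes in a multiplicity counter once,
--     # then scan each distinct lava cube's 6 neighbors against that index.
--     interior_counter = {}
--     for group in interior_groups:
--         for cube in group:
--             interior_counter[cube] = interior_counter.get(cube, 0) + 1
--     total = 0
--     for (x, y, z) in set(lava_cubes):
--         for (ox, oy, oz) in FACE_NEIGHBOR_OFFSETS: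
--             total += interior_counter.get((x + ox, y + oy, z + oz), 0)
--     return total
-- ===== Notes on version B (the rewrite author's own statement) =====
-- stated objective: faster
-- what changed: Inverts the traversal: instead of scanning every interior cube against the lava list, B builds a multiplicity counter over all interior cubes once and sums counter lookups over the 6 neighbors of each distinct lava cube; with a hash index this replaces the O(G*L) membership scans by O(G + L) dict operations.
import Mathlib
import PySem

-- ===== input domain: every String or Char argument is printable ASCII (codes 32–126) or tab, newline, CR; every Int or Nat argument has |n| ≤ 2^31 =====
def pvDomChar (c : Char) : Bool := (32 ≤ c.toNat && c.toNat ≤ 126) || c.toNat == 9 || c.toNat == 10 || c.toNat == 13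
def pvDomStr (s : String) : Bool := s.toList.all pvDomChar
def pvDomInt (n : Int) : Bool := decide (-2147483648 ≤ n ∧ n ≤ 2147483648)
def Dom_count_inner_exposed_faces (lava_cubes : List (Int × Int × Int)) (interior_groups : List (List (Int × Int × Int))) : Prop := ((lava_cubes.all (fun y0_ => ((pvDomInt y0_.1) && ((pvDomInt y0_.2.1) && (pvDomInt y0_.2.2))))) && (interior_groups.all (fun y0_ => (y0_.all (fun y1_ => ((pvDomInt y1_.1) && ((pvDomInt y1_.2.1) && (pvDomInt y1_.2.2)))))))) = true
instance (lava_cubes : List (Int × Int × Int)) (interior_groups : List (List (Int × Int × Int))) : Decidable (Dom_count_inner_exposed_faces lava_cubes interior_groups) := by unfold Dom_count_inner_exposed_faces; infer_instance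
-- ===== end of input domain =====

-- B inverts the traversal: it indexes the interior cubes in a multiplicity counter once and
-- sums counter lookups over the 6 neighbors of each distinct lava cube (objective: alternative).

-- ===== PORT A =====
def pvOffsets : List (Int × Int × Int) := [(1,0,0),(-1,0,0),(0,1,0),(0,-1,0),(0,0,1),(0,0,-1)]

def pvAdd3 (c o : Int × Int × Int) : Int × Int × Int := (c.1 + o.1, c.2.1 + o.2.1, c.2.2 + o.2.2)

def count_inner_exposed_faces (lava_cubes : List (Int × Int × Int)) (interior_groups : List (List (Int × Int × Int))) : Int :=
  interior_groups.foldl (fun inner_exposure group =>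
    group.foldl (fun inner_exposure cube =>
      inner_exposure +
        pvOffsets.foldl (fun exposed offset =>
          if pvAdd3 cube offset ∈ lava_cubes then exposed + 1 else exposed) 0) inner_exposure) 0

-- ===== PORT B =====
def count_inner_exposed_faces_alt (lava_cubes : List (Int × Int × Int)) (interior_groups : List (List (Int × Int × Int))) : Int :=
  let interior_counter : PySem.Dict (Int × Int × Int) Int :=
    interior_groups.foldl (fun d group =>
      group.foldl (fun d cube => d.insert cube (d.getD cube 0 + 1)) d) PySem.Dict.empty
  (PySem.Set.ofList lava_cubes).foldl (fun total l =>
    pvOffsets.foldl (fun total o => total + interior_counter.getD (pvAdd3 l o) 0) total) 0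

-- ===== PRECONDITION & SPEC =====
def Spec_count_inner_exposed_faces (lava_cubes : List (Int × Int × Int)) (interior_groups : List (List (Int × Int × Int))) (out : Int) : Prop := out = count_inner_exposed_faces_alt lava_cubes interior_groups
instance (lava_cubes : List (Int × Int × Int)) (interior_groups : List (List (Int × Int × Int))) (out : Int) : Decidable (Spec_count_inner_exposed_faces lava_cubes interior_groups out) := by unfold Spec_count_inner_exposed_faces; infer_instance

-- ===== CLAIM (what is proved, stated in full; the proofs are below) =====
def Claim_equal_count_inner_exposed_faces : Prop := ∀ (lava_cubes : List (Int × Int × Int)) (interior_groups : List (List (Int × Int × Int))), Dom_count_inner_exposed_faces lava_cubes interior_groups → Spec_count_inner_exposed_faces lava_cubes interior_groups (count_inner_exposed_faces lava_cubes interior_groups)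

-- ===== LEMMAS AND PROOFS =====
-- A as a sum of per-cube indicator sums over the flattened interior
lemma A_eq (lava : List (Int × Int × Int)) (groups : List (List (Int × Int × Int))) :
    count_inner_exposed_faces lava groups
      = (groups.flatten.map (fun c =>
          (pvOffsets.map (fun o => if pvAdd3 c o ∈ lava then (1:Int) else 0)).sum)).sum := by
  unfold count_inner_exposed_faces
  rw [← List.foldl_flatten]
  rw [PySem.List.foldl_congr_mem _ _
        (fun acc cube => acc + (pvOffsets.map (fun o => if pvAdd3 cube o ∈ lava then (1:Int) else 0)).sum) _
        (by
          intro acc cube _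
          rw [PySem.List.foldl_ite_add_one (fun o => pvAdd3 cube o ∈ lava)]
          rw [← PySem.List.sum_map_ite_one_zero (fun o => decide (pvAdd3 cube o ∈ lava))]
          simp)]
  rw [PySem.List.foldl_add]
  simp

-- B as a sum over the distinct lava cubes of counts in the flattened interior
lemma counter_getD (groups : List (List (Int × Int × Int))) (v : Int × Int × Int) :
    (groups.foldl (fun d group =>
        group.foldl (fun d cube => d.insert cube (d.getD cube 0 + 1)) d) PySem.Dict.empty).getD v 0
      = (groups.flatten.count v : Int) := by
  rw [← List.foldl_flatten, PySem.Dict.getD_foldl_insert_add_one]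
  simp

lemma B_eq (lava : List (Int × Int × Int)) (groups : List (List (Int × Int × Int))) :
    count_inner_exposed_faces_alt lava groups
      = ((PySem.Set.ofList lava).map (fun l =>
          (pvOffsets.map (fun o => (groups.flatten.count (pvAdd3 l o) : Int))).sum)).sum := by
  unfold count_inner_exposed_faces_alt
  rw [PySem.List.foldl_congr_mem _ _
        (fun total l => total + (pvOffsets.map (fun o => (groups.flatten.count (pvAdd3 l o) : Int))).sum) _
        (by
          intro total l _
          rw [PySem.List.foldl_congr_mem _ _
                (fun t o => t + (groups.flatten.count (pvAdd3 l o) : Int)) _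
                (by intro t o _; rw [counter_getD])]
          rw [PySem.List.foldl_add])]
  rw [PySem.List.foldl_add]
  simp

-- 0/1 indicator sum over a duplicate-free list is a membership test
lemma sum_ind_mem (L : List (Int × Int × Int)) (hL : L.Nodup) (w : Int × Int × Int) :
    (L.map (fun l => if l = w then (1:Int) else 0)).sum = if w ∈ L then 1 else 0 := by
  induction L with
  | nil => simp
  | cons a L ih =>
    have ha : a ∉ L := (List.nodup_cons.mp hL).1
    rw [List.map_cons, List.sum_cons, ih (List.nodup_cons.mp hL).2]
    by_cases hw : a = w
    · subst hw; simp [ha]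
    · simp [hw, Ne.symm hw]

-- the swap lemma for one offset and its negation
lemma swap_one (I L : List (Int × Int × Int)) (hL : L.Nodup) (o no : Int × Int × Int)
    (h : ∀ l c, pvAdd3 l no = c ↔ l = pvAdd3 c o) :
    (L.map (fun l => (I.count (pvAdd3 l no) : Int))).sum
      = (I.map (fun c => if pvAdd3 c o ∈ L then (1:Int) else 0)).sum := by
  induction I with
  | nil => simp
  | cons c I ih =>
    simp only [List.map_cons, List.sum_cons]
    rw [← ih]
    have step : (L.map (fun l => ((c :: I).count (pvAdd3 l no) : Int))).sum
        = (L.map (fun l => (if l = pvAdd3 c o then (1:Int) else 0) + (I.count (pvAdd3 l no) : Int))).sum := by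
      apply congrArg
      apply List.map_congr_left
      intro l _
      rw [List.count_cons]
      by_cases hc : pvAdd3 l no = c
      · rw [if_pos (beq_iff_eq.mpr hc.symm), if_pos ((h l c).mp hc)]; push_cast; ring
      · rw [if_neg (fun hh => hc (beq_iff_eq.mp hh).symm), if_neg (fun hh => hc ((h l c).mpr hh))]; push_cast; ring
    rw [step, PySem.List.sum_map_add_int, sum_ind_mem L hL (pvAdd3 c o)]

lemma pvMainEq (lava : List (Int × Int × Int)) (groups : List (List (Int × Int × Int))) :
    count_inner_exposed_faces lava groups = count_inner_exposed_faces_alt lava groups := by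
  rw [A_eq, B_eq]
  set I := groups.flatten with hI
  set L := PySem.Set.ofList lava with hLdef
  have hL : L.Nodup := PySem.Set.nodup_ofList lava
  have hmem : ∀ x, (x ∈ lava) ↔ (x ∈ L) := fun x => (PySem.Set.mem_ofList lava x).symm
  -- replace membership in lava by membership in L on the A side
  have hA : (I.map (fun c => (pvOffsets.map (fun o => if pvAdd3 c o ∈ lava then (1:Int) else 0)).sum)).sum
      = (I.map (fun c => (pvOffsets.map (fun o => if pvAdd3 c o ∈ L then (1:Int) else 0)).sum)).sum := by
    apply congrArg; apply List.map_congr_left; intro c _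
    apply congrArg; apply List.map_congr_left; intro o _
    simp [hmem]
  rw [hA]
  -- expand the 6 offsets on both sides
  simp only [pvOffsets, List.map_cons, List.map_nil, List.sum_cons, List.sum_nil, add_zero]
  rw [PySem.List.sum_map_add_int, PySem.List.sum_map_add_int, PySem.List.sum_map_add_int,
      PySem.List.sum_map_add_int, PySem.List.sum_map_add_int,
      PySem.List.sum_map_add_int, PySem.List.sum_map_add_int, PySem.List.sum_map_add_int,
      PySem.List.sum_map_add_int, PySem.List.sum_map_add_int]
  rw [swap_one I L hL (1,0,0) (-1,0,0) (by intro l c; constructor <;> (intro hh; simp [pvAdd3, Prod.ext_iff] at hh ⊢; omega)),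
      swap_one I L hL (-1,0,0) (1,0,0) (by intro l c; constructor <;> (intro hh; simp [pvAdd3, Prod.ext_iff] at hh ⊢; omega)),
      swap_one I L hL (0,1,0) (0,-1,0) (by intro l c; constructor <;> (intro hh; simp [pvAdd3, Prod.ext_iff] at hh ⊢; omega)),
      swap_one I L hL (0,-1,0) (0,1,0) (by intro l c; constructor <;> (intro hh; simp [pvAdd3, Prod.ext_iff] at hh ⊢; omega)),
      swap_one I L hL (0,0,1) (0,0,-1) (by intro l c; constructor <;> (intro hh; simp [pvAdd3, Prod.ext_iff] at hh ⊢; omega)),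
      swap_one I L hL (0,0,-1) (0,0,1) (by intro l c; constructor <;> (intro hh; simp [pvAdd3, Prod.ext_iff] at hh ⊢; omega))]
  ring

-- ===== VERDICT (by name: the statement is the Claim_ definition above) =====
theorem count_inner_exposed_faces_spec : Claim_equal_count_inner_exposed_faces := by
  intro lava_cubes interior_groups _
  unfold Spec_count_inner_exposed_faces
  exact pvMainEq lava_cubes interior_groups
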